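-- pv_equiv track=rewrite | github.com/heroworkshop/advent_of_code | y2024/day_22.py | get_digits
-- ===== SOURCE A (Python) =====
-- def get_digits(n, secret):
--     diffs = []
--     digit0 = secret % 10
--     for _ in range(n):
--         secret = next_secret(secret)
--         digit = secret % 10
--         diffs.append((digit, (digit - digit0)))
--         digit0 = digit
--     return diffs
--
-- def mix(secret, n):
--     return secret ^ n
--
-- def prune(n):
--     return n % 16777216
--
-- def next_secret(secret):
--     # Calculate the result of multiplying the secret number by 64. Then, mix this result into the secret number. Finally, prune the secret number.
--     secret = mix(secret, secret * 64)
--     secret = prune(secret)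
--     # Calculate the result of dividing the secret number by 32. Round the result down to the nearest integer.
--     # Then, mix this result into the secret number. Finally, prune the secret number.
--     secret = mix(secret, secret // 32)
--     secret = prune(secret)
--     # Calculate the result of multiplying the secret number by 2048.
--     # Then, mix this result into the secret number. Finally, prune the secret number.
--     secret = mix(secret, secret * 2048)
--     secret = prune(secret)
--     return secret
-- ===== SOURCE B (Python) =====
-- _MASK = 0xFFFFFF
--
-- def _base_step(s):
--     # the PRNG step (shift/xor/mask form) on a 24-bit value; used only to fill the tables
--     s = (s ^ (s << 6)) & _MASK
--     s = (s ^ (s >> 5)) & _MASK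
--     return (s ^ (s << 11)) & _MASK
--
-- # The step is GF(2)-linear on the 24 bits, so it is the XOR of its action on the
-- # three bytes: one precomputed 256-entry table per byte replaces the arithmetic.
-- _T0 = [_base_step(b) for b in range(256)]
-- _T1 = [_base_step(b << 8) for b in range(256)]
-- _T2 = [_base_step(b << 16) for b in range(256)]
--
-- def _step(s):
--     s &= _MASK
--     return _T0[s & 255] ^ _T1[(s >> 8) & 255] ^ _T2[s >> 16]
--
-- def get_digits(n, secret):
--     digits = [secret % 10]
--     s = secret
--     for _ in range(n):
--         s = _step(s)
--         digits.append(s % 10)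
--     return [(d, d - p) for p, d in zip(digits, digits[1:])]
-- ===== Notes on version B (the rewrite author's own statement) =====
-- stated objective: faster
-- what changed: Exploits that the PRNG step is GF(2)-linear on 24 bits: B precomputes three 256-entry XOR lookup tables (one per byte) and advances the secret by three table lookups XORed together, replacing A's per-step multiply/xor/divide/mod/prune arithmetic; the (digit, diff) pairs are then derived from a staged digit list instead of A's fused loop state.
import Mathlib
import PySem

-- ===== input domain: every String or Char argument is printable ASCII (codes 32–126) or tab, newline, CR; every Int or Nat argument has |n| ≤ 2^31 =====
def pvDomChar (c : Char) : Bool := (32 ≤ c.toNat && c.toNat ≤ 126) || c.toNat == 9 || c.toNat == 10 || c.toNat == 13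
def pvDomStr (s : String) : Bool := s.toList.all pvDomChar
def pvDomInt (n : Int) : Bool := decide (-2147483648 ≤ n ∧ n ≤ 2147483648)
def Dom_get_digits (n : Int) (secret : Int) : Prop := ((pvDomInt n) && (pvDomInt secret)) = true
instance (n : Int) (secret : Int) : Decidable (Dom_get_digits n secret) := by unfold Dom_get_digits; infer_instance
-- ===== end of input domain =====

-- B replaces A's per-step xor/multiply/divide/mod arithmetic by three precomputed
-- 256-entry XOR lookup tables (the PRNG step is GF(2)-linear on its 24 bits) and
-- derives the pairs from a staged digit list instead of A's fused loop state.

-- ===== PORT A =====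
def nextSecret (secret : Int) : Int :=
  let s1 := PySem.Int.mod (PySem.Int.bxor secret (secret * 64)) 16777216
  let s2 := PySem.Int.mod (PySem.Int.bxor s1 (PySem.Int.floordiv s1 32)) 16777216
  PySem.Int.mod (PySem.Int.bxor s2 (s2 * 2048)) 16777216

-- A's for-loop over range(n): fuel recursion carrying the mutated (secret, digit0)
def getDigitsLoopA : Nat → Int → Int → List (Int × Int)
  | 0, _, _ => []
  | k + 1, secret, digit0 =>
    let s := nextSecret secret
    let digit := PySem.Int.mod s 10
    (digit, digit - digit0) :: getDigitsLoopA k s digit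

def get_digits (n : Int) (secret : Int) : List (Int × Int) :=
  getDigitsLoopA n.toNat secret (PySem.Int.mod secret 10)

-- ===== PORT B =====
-- _base_step: the shift/xor/mask form of the step, used only to fill the tables
def baseStep (s : Int) : Int :=
  let s1 := PySem.Int.band (PySem.Int.bxor s (s <<< (6:Nat))) 16777215
  let s2 := PySem.Int.band (PySem.Int.bxor s1 (s1 >>> (5:Nat))) 16777215
  PySem.Int.band (PySem.Int.bxor s2 (s2 <<< (11:Nat))) 16777215

-- _T0/_T1/_T2 = [_base_step(b << 8j) for b in range(256)]
def tblT0 : List Int := (PySem.List.pyRange 0 256 1).map (fun b => baseStep b)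
def tblT1 : List Int := (PySem.List.pyRange 0 256 1).map (fun b : Int => baseStep (b <<< (8:Nat)))
def tblT2 : List Int := (PySem.List.pyRange 0 256 1).map (fun b : Int => baseStep (b <<< (16:Nat)))

-- _step: mask, then three table lookups XORed together; each index is in [0,256),
-- so the always-in-range lookup T[i] is ported as (pyGet? …).getD 0 (default unused)
def tableStep (s : Int) : Int :=
  let m := PySem.Int.band s 16777215
  PySem.Int.bxor
    (PySem.Int.bxor ((PySem.List.pyGet? tblT0 (PySem.Int.band m 255)).getD 0)
      ((PySem.List.pyGet? tblT1 (PySem.Int.band (m >>> (8:Nat)) 255)).getD 0))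
    ((PySem.List.pyGet? tblT2 (m >>> (16:Nat))).getD 0)

-- B's first loop: the appended digits (s % 10 for each advanced secret)
def digitsLoopB : Nat → Int → List Int
  | 0, _ => []
  | k + 1, s =>
    let t := tableStep s
    PySem.Int.mod t 10 :: digitsLoopB k t

def get_digits_alt (n : Int) (secret : Int) : List (Int × Int) :=
  let digits := PySem.Int.mod secret 10 :: digitsLoopB n.toNat secret
  (digits.zip digits.tail).map (fun pd => (pd.2, pd.2 - pd.1))

-- ===== PRECONDITION & SPEC =====
def Spec_get_digits (n : Int) (secret : Int) (out : List (Int × Int)) : Prop := out = get_digits_alt n secret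
instance (n : Int) (secret : Int) (out : List (Int × Int)) : Decidable (Spec_get_digits n secret out) := by unfold Spec_get_digits; infer_instance

-- ===== CLAIM (what is proved, stated in full; the proofs are below) =====
def Claim_equal_get_digits : Prop := ∀ (n : Int) (secret : Int), Dom_get_digits n secret → Spec_get_digits n secret (get_digits n secret)

-- ===== LEMMAS AND PROOFS =====

-- Nat mirror of the shift/xor/mask step
def natStage1 (m : Nat) : Nat := (m ^^^ m <<< 6) &&& 16777215
def natStage2 (m : Nat) : Nat := (m ^^^ m >>> 5) &&& 16777215
def natStage3 (m : Nat) : Nat := (m ^^^ m <<< 11) &&& 16777215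
def natStep (m : Nat) : Nat := natStage3 (natStage2 (natStage1 m))

theorem shiftLeft_xor_distrib (x y k : Nat) : (x ^^^ y) <<< k = x <<< k ^^^ y <<< k := by
  apply Nat.eq_of_testBit_eq
  intro i
  rcases Decidable.em (k ≤ i) with h | h
  · simp [Nat.testBit_shiftLeft, Nat.testBit_xor, h]
  · simp [Nat.testBit_shiftLeft, Nat.testBit_xor, h]

theorem shiftRight_xor_distrib (x y k : Nat) : (x ^^^ y) >>> k = x >>> k ^^^ y >>> k := by
  apply Nat.eq_of_testBit_eq
  intro i
  simp [Nat.testBit_shiftRight, Nat.testBit_xor]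

theorem natStage1_linear (x y : Nat) : natStage1 (x ^^^ y) = natStage1 x ^^^ natStage1 y := by
  unfold natStage1
  rw [shiftLeft_xor_distrib, ← Nat.and_xor_distrib_right]
  congr 1
  simp [Nat.xor_assoc, Nat.xor_comm, Nat.xor_left_comm]

theorem natStage2_linear (x y : Nat) : natStage2 (x ^^^ y) = natStage2 x ^^^ natStage2 y := by
  unfold natStage2
  rw [shiftRight_xor_distrib, ← Nat.and_xor_distrib_right]
  congr 1
  simp [Nat.xor_assoc, Nat.xor_comm, Nat.xor_left_comm]

theorem natStage3_linear (x y : Nat) : natStage3 (x ^^^ y) = natStage3 x ^^^ natStage3 y := by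
  unfold natStage3
  rw [shiftLeft_xor_distrib, ← Nat.and_xor_distrib_right]
  congr 1
  simp [Nat.xor_assoc, Nat.xor_comm, Nat.xor_left_comm]

theorem natStep_linear (x y : Nat) : natStep (x ^^^ y) = natStep x ^^^ natStep y := by
  unfold natStep
  rw [natStage1_linear, natStage2_linear, natStage3_linear]

-- x ^^^ y = x + y when the bit sets are disjoint
theorem xor_eq_add_of_and_eq_zero : ∀ (x y : Nat), x &&& y = 0 → x ^^^ y = x + y := by
  intro x
  induction x using Nat.strong_induction_on with
  | _ x ih =>
    intro y h
    rcases Nat.eq_zero_or_pos x with hx | hx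
    · simp [hx]
    · have hdiv : x / 2 &&& y / 2 = 0 := by
        rw [← Nat.and_div_two, h]
      have hrec := ih (x / 2) (Nat.div_lt_self hx (by norm_num)) (y / 2) hdiv
      have hb : (x &&& y).testBit 0 = false := by rw [h]; exact Nat.zero_testBit 0
      rw [Nat.testBit_and] at hb
      simp only [Nat.testBit_zero] at hb
      have hpar : x % 2 = 0 ∨ y % 2 = 0 := by
        rcases Bool.and_eq_false_iff.mp hb with h' | h' <;>
          simp only [decide_eq_false_iff_not] at h' <;> omega
      have e1 : (x ^^^ y) / 2 = x / 2 ^^^ y / 2 := Nat.xor_div_two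
      rw [hrec] at e1
      have e2 : (x ^^^ y) % 2 = (x + y) % 2 := Nat.xor_mod_two_eq
      generalize hz : x ^^^ y = z at e1 e2 ⊢
      omega

-- (2^k - 1) ^^^ v = 2^k - 1 - v for v < 2^k (xor with the all-ones mask complements)
theorem mask_xor_eq_sub : ∀ (k v : Nat), v < 2 ^ k → (2 ^ k - 1) ^^^ v = 2 ^ k - 1 - v := by
  intro k
  induction k with
  | zero => intro v hv; interval_cases v; rfl
  | succ k ih =>
    intro v hv
    have hp : 0 < 2 ^ k := Nat.two_pow_pos k
    have h2 : 2 ^ (k + 1) = 2 * 2 ^ k := by ring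
    have e1 : ((2 ^ (k + 1) - 1) ^^^ v) / 2 = 2 ^ k - 1 - v / 2 := by
      rw [Nat.xor_div_two]
      have : 2 ^ (k + 1) - 1 = 2 * (2 ^ k - 1) + 1 := by omega
      rw [this]
      have hq : (2 * (2 ^ k - 1) + 1) / 2 = 2 ^ k - 1 := by omega
      rw [hq, ih (v / 2) (by omega)]
    have e2 : ((2 ^ (k + 1) - 1) ^^^ v) % 2 = (2 ^ (k + 1) - 1 + v) % 2 := Nat.xor_mod_two_eq
    omega

-- (x ^^^ y) % 2^k distributes over the operands
theorem xor_mod_two_pow (x y k : Nat) : (x ^^^ y) % 2 ^ k = x % 2 ^ k ^^^ y % 2 ^ k := by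
  rw [← Nat.and_two_pow_sub_one_eq_mod, ← Nat.and_two_pow_sub_one_eq_mod,
    ← Nat.and_two_pow_sub_one_eq_mod, Nat.and_xor_distrib_right]

theorem and_shiftLeft_eq_zero (x y k : Nat) (hx : x < 2 ^ k) : x &&& y <<< k = 0 := by
  apply Nat.eq_of_testBit_eq
  intro i
  simp only [Nat.testBit_and, Nat.testBit_shiftLeft, Nat.zero_testBit]
  rcases Decidable.em (k ≤ i) with h | h
  · have : x.testBit i = false :=
      Nat.testBit_lt_two_pow (lt_of_lt_of_le hx (Nat.pow_le_pow_right (by norm_num) h))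
    simp [this]
  · simp [h]

-- byte decomposition of a 24-bit value as a xor of disjoint chunks
theorem byte_decomp (r : Nat) (_hr : r < 16777216) :
    r = r % 256 ^^^ ((r / 256 % 256) <<< 8 ^^^ (r / 65536) <<< 16) := by
  have h1 : (r / 256 % 256) <<< 8 ^^^ (r / 65536) <<< 16 = (r / 256 % 256) <<< 8 + (r / 65536) <<< 16 := by
    apply xor_eq_add_of_and_eq_zero
    exact and_shiftLeft_eq_zero _ _ 16 (by
      rw [Nat.shiftLeft_eq]
      have := Nat.mod_lt (r / 256) (show 0 < 256 by norm_num)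
      norm_num
      omega)
  rw [h1]
  have h2 : r % 256 ^^^ ((r / 256 % 256) <<< 8 + (r / 65536) <<< 16) =
      r % 256 + ((r / 256 % 256) <<< 8 + (r / 65536) <<< 16) := by
    apply xor_eq_add_of_and_eq_zero
    have : (r / 256 % 256) <<< 8 + (r / 65536) <<< 16 = (r / 256 % 256 + (r / 65536) <<< 8) <<< 8 := by
      simp [Nat.shiftLeft_eq, Nat.add_mul, Nat.mul_assoc]
    rw [this]
    exact and_shiftLeft_eq_zero _ _ 8 (Nat.mod_lt r (by norm_num))
  rw [h2]
  simp only [Nat.shiftLeft_eq]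
  have hdd : r / 65536 = r / 256 / 256 := by rw [Nat.div_div_eq_div_mul]
  norm_num
  omega

theorem modM_natCast (a : Nat) : PySem.Int.mod (a : Int) 16777216 = ((a % 16777216 : Nat) : Int) := by
  have h : PySem.Int.mod (a : Int) 16777216 = (a : Int) % 16777216 := by simp [pysem]
  rw [h]; push_cast; ring

theorem xor_mod_M (x y : Nat) : (x ^^^ y) % 16777216 = x % 16777216 ^^^ y % 16777216 := by
  have h := xor_mod_two_pow x y 24
  norm_num at h
  exact h

theorem bandM_natCast (a : Nat) : PySem.Int.band (a : Int) 16777215 = ((a &&& 16777215 : Nat) : Int) := by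
  have h := PySem.Int.band_natCast a 16777215
  simpa using h

-- casts: baseStep on a Nat computes natStep
theorem baseStep_natCast (m : Nat) : baseStep (m : Int) = ((natStep m : Nat) : Int) := by
  unfold baseStep natStep natStage1 natStage2 natStage3
  have hl : ∀ (a k : Nat), ((a : Int) <<< k) = ((a <<< k : Nat) : Int) := by
    intro a k; rw [Int.shiftLeft_eq, Nat.shiftLeft_eq]; push_cast; ring
  have hr : ∀ (a k : Nat), ((a : Int) >>> k) = ((a >>> k : Nat) : Int) := fun _ _ => rfl
  simp only [hl, hr, bandM_natCast, PySem.Int.bxor_natCast]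

-- band with the 24-bit mask is Python's % 2^24, for every integer
theorem band_mask_eq_mod (s : Int) : PySem.Int.band s 16777215 = PySem.Int.mod s 16777216 := by
  have hm : PySem.Int.mod s 16777216 = s % 16777216 := by simp [pysem]
  rw [hm]
  rcases Decidable.em (0 ≤ s) with hs | hs
  · rw [PySem.Int.band_of_nonneg hs (by norm_num)]
    have ht : (16777215 : Int).toNat = 2 ^ 24 - 1 := by decide
    have : s.toNat &&& (16777215 : Int).toNat = s.toNat % 16777216 := by
      rw [ht, Nat.and_two_pow_sub_one_eq_mod]
    rw [this]
    push_cast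
    omega
  · unfold PySem.Int.band
    rw [if_neg hs, if_pos (by norm_num : (0:Int) ≤ 16777215)]
    have h1 : (16777215 : Int).toNat &&& (-s - 1).toNat = (-s - 1).toNat % 16777216 := by
      have e : (16777215 : Int).toNat = 2 ^ 24 - 1 := by decide
      rw [e, Nat.and_comm, Nat.and_two_pow_sub_one_eq_mod]
    rw [h1]
    have h2 : ((-s - 1).toNat % 16777216 : Int) = (-s - 1) % 16777216 := by
      omega
    have h3 : ((16777215 : Int).toNat : Int) = 16777215 := by decide
    omega

-- stage 1 of A's step only depends on the low 24 bits of the secret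
theorem stage1_normalize (s : Int) :
    PySem.Int.mod (PySem.Int.bxor s (s * 64)) 16777216 =
      ((natStage1 (s % 16777216).toNat : Nat) : Int) := by
  have hrlt : (s % 16777216).toNat < 16777216 := by
    have := Int.emod_nonneg s (show (16777216:Int) ≠ 0 by norm_num)
    have := Int.emod_lt_of_pos s (show (0:Int) < 16777216 by norm_num)
    omega
  set r : Nat := (s % 16777216).toNat with hrdef
  have hnat1 : natStage1 r = (r ^^^ r * 64) % 16777216 := by
    unfold natStage1
    rw [Nat.shiftLeft_eq]
    have h : (16777215 : Nat) = 2 ^ 24 - 1 := by norm_num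
    rw [h, Nat.and_two_pow_sub_one_eq_mod]
  rcases Decidable.em (0 ≤ s) with hs | hs
  · rw [PySem.Int.bxor_of_nonneg hs (by omega), show (s * 64).toNat = s.toNat * 64 from by omega,
      modM_natCast, hnat1]
    congr 1
    rw [xor_mod_M, xor_mod_M]
    have e1 : s.toNat % 16777216 = r := by omega
    have e2 : s.toNat * 64 % 16777216 = r * 64 % 16777216 := by
      rw [Nat.mul_mod, e1]
    rw [e1, e2, Nat.mod_eq_of_lt hrlt]
  · -- s < 0: both xor operands are negative; go through the complements
    have hbx : PySem.Int.bxor s (s * 64) = (((-s - 1).toNat ^^^ (-(s * 64) - 1).toNat : Nat) : Int) := by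
      unfold PySem.Int.bxor
      rw [if_neg (by omega), if_neg (by omega)]
    rw [hbx, modM_natCast, hnat1]
    congr 1
    rw [xor_mod_M, xor_mod_M]
    have e1 : (-s - 1).toNat % 16777216 = 16777215 - r := by
      have hc : ((-s - 1).toNat % 16777216 : Int) = (-s - 1) % 16777216 := by omega
      omega
    have e2 : (-(s * 64) - 1).toNat % 16777216 = 16777215 - r * 64 % 16777216 := by
      have hc : ((-(s * 64) - 1).toNat % 16777216 : Int) = (-(s * 64) - 1) % 16777216 := by omega
      have hm : s * 64 % 16777216 = s % 16777216 * 64 % 16777216 := by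
        conv_lhs => rw [Int.mul_emod]
        rw [Int.mul_emod (s % 16777216)]
        norm_num
      have hr64 : ((r * 64 % 16777216 : Nat) : Int) = s % 16777216 * 64 % 16777216 := by
        push_cast
        omega
      omega
    rw [e1, e2]
    have hx1 : 16777215 - r = (2 ^ 24 - 1) ^^^ r := by
      rw [mask_xor_eq_sub 24 r (by omega)]; norm_num
    have hx2 : 16777215 - r * 64 % 16777216 = (2 ^ 24 - 1) ^^^ (r * 64 % 16777216) := by
      rw [mask_xor_eq_sub 24 (r * 64 % 16777216) (by omega)]; norm_num
    have e3 : r % 16777216 = r := by omega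
    rw [hx1, hx2, e3]
    simp [Nat.xor_assoc, Nat.xor_comm, Nat.xor_left_comm]

theorem stage2_natCast (a : Nat) :
    PySem.Int.mod (PySem.Int.bxor (a : Int) (PySem.Int.floordiv (a : Int) 32)) 16777216 =
      ((natStage2 a : Nat) : Int) := by
  have hfd : PySem.Int.floordiv (a : Int) 32 = ((a / 32 : Nat) : Int) := by
    have h : PySem.Int.floordiv (a : Int) 32 = (a : Int) / 32 := by simp [pysem]
    rw [h]; push_cast; rfl
  rw [hfd, PySem.Int.bxor_natCast, modM_natCast]
  congr 1
  unfold natStage2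
  rw [Nat.shiftRight_eq_div_pow]
  have h : (16777215 : Nat) = 2 ^ 24 - 1 := by norm_num
  rw [h, Nat.and_two_pow_sub_one_eq_mod]

theorem stage3_natCast (a : Nat) :
    PySem.Int.mod (PySem.Int.bxor (a : Int) ((a : Int) * 2048)) 16777216 =
      ((natStage3 a : Nat) : Int) := by
  have hmul : ((a : Int) * 2048) = ((a * 2048 : Nat) : Int) := by push_cast; ring
  rw [hmul, PySem.Int.bxor_natCast, modM_natCast]
  congr 1
  unfold natStage3
  rw [Nat.shiftLeft_eq]
  have h : (16777215 : Nat) = 2 ^ 24 - 1 := by norm_num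
  rw [h, Nat.and_two_pow_sub_one_eq_mod]

-- A's whole step computes natStep of the low 24 bits
theorem nextSecret_eq_natStep (s : Int) :
    nextSecret s = ((natStep (s % 16777216).toNat : Nat) : Int) := by
  simp only [nextSecret]
  rw [stage1_normalize, stage2_natCast, stage3_natCast]
  rfl

theorem pyRange256 : PySem.List.pyRange 0 256 1 = (List.range 256).map (fun k : Nat => (k : Int)) := by
  unfold PySem.List.pyRange
  norm_num
  rfl

-- each table lookup returns baseStep of its cast index
theorem table_lookup (f : Int → Int) (i : Nat) (hi : i < 256) :
    PySem.List.pyGet? ((PySem.List.pyRange 0 256 1).map f) (i : Int) = some (f (i : Int)) := by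
  rw [PySem.List.pyGet?_natCast, pyRange256, List.map_map, List.getElem?_map,
    List.getElem?_range hi]
  rfl

theorem band255_natCast (a : Nat) : PySem.Int.band (a : Int) 255 = ((a % 256 : Nat) : Int) := by
  have h := PySem.Int.band_natCast a 255
  have h2 : a &&& 255 = a % 256 := by
    have e : (255 : Nat) = 2 ^ 8 - 1 := by norm_num
    rw [e, Nat.and_two_pow_sub_one_eq_mod]
  simpa [h2] using h

-- B's table-driven step equals A's arithmetic step, on every integer
theorem tableStep_eq_nextSecret (s : Int) : tableStep s = nextSecret s := by
  have hr0 : 0 ≤ s % 16777216 := Int.emod_nonneg s (by norm_num)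
  have hr1 : s % 16777216 < 16777216 := Int.emod_lt_of_pos s (by norm_num)
  set r : Nat := (s % 16777216).toNat with hrdef
  have hrlt : r < 16777216 := by omega
  have hm : PySem.Int.band s 16777215 = (r : Int) := by
    rw [band_mask_eq_mod]
    have h : PySem.Int.mod s 16777216 = s % 16777216 := by simp [pysem]
    rw [h]; omega
  have hsr : ∀ k : Nat, ((r : Int) >>> k) = ((r >>> k : Nat) : Int) := fun _ => rfl
  have hc2lt : r >>> 16 < 256 := by
    rw [Nat.shiftRight_eq_div_pow]; omega
  simp only [tableStep, tblT0, tblT1, tblT2]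
  rw [hm, band255_natCast, hsr 8, band255_natCast, hsr 16,
    table_lookup _ _ (Nat.mod_lt _ (by norm_num)),
    table_lookup _ _ (Nat.mod_lt _ (by norm_num)),
    table_lookup _ _ hc2lt]
  simp only [Option.getD_some]
  have hshl : ∀ (a k : Nat), ((a : Int) <<< k) = ((a <<< k : Nat) : Int) := by
    intro a k; rw [Int.shiftLeft_eq, Nat.shiftLeft_eq]; push_cast; ring
  rw [hshl, hshl, baseStep_natCast, baseStep_natCast, baseStep_natCast,
    PySem.Int.bxor_natCast, PySem.Int.bxor_natCast, nextSecret_eq_natStep, ← hrdef]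
  congr 1
  have hd := byte_decomp r hrlt
  have e16 : r / 65536 = r >>> 16 := by rw [Nat.shiftRight_eq_div_pow]
  have e8 : r / 256 = r >>> 8 := by rw [Nat.shiftRight_eq_div_pow]
  rw [e16, e8] at hd
  conv_rhs => rw [hd]
  rw [natStep_linear, natStep_linear, Nat.xor_assoc]

-- the fused loop/pipeline equivalence, once the two steps agree
theorem loopA_eq_pipeline (k : Nat) (s : Int) :
    getDigitsLoopA k s (PySem.Int.mod s 10) =
      (let digits := PySem.Int.mod s 10 :: digitsLoopB k s
       (digits.zip digits.tail).map (fun pd => (pd.2, pd.2 - pd.1))) := by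
  induction k generalizing s with
  | zero => rfl
  | succ k ih =>
    have ih' := ih (nextSecret s)
    simp only [getDigitsLoopA, digitsLoopB, tableStep_eq_nextSecret] at ih' ⊢
    cases hk : k with
    | zero => simp [getDigitsLoopA, digitsLoopB]
    | succ k' =>
      rw [← hk]
      simp only [List.tail_cons, List.zip_cons_cons, List.map_cons] at ih' ⊢
      rw [ih']

-- ===== VERDICT (by name: the statement is the Claim_ definition above) =====
theorem get_digits_spec : Claim_equal_get_digits := by
  intro n secret _
  exact loopA_eq_pipeline n.toNat secret
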